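-- pv_equiv track=rewrite | github.com/mj25200/Python-2048 | j2048_motor_47742.py | somar_esquerda
-- ===== SOURCE A (Python) =====
-- def somar_esquerda(uma_lista):
--     nova_lista = []
--     pontos = 0
--     k = 0
--     while k < len(uma_lista) - 1:
--         if uma_lista[k] == uma_lista [k+1]:
--             nova_lista.append(uma_lista[k] + uma_lista[k+1])
--             pontos = pontos + uma_lista[k] + uma_lista[k+1]
--             k = k + 2
--         else:
--             nova_lista.append(uma_lista[k])
--             k = k + 1
--     if k == len(uma_lista) - 1:
--         nova_lista.append(uma_lista[k])
--     while len(nova_lista) != len(uma_lista):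
--         nova_lista.append(0)
--     return (nova_lista, pontos)
-- ===== SOURCE B (Python) =====
-- def somar_esquerda(uma_lista):
--     # Run-length encode, then emit each run's merged pairs by arithmetic.
--     runs = []
--     for x in uma_lista:
--         if runs and runs[-1][0] == x:
--             runs[-1][1] += 1
--         else:
--             runs.append([x, 1])
--     nova_lista = []
--     pontos = 0
--     for v, c in runs:
--         nova_lista.extend([v + v] * (c // 2))
--         pontos += (v + v) * (c // 2)
--         if c % 2:
--             nova_lista.append(v)
--     nova_lista.extend([0] * (len(uma_lista) - len(nova_lista)))
--     return (nova_lista, pontos)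
-- ===== Notes on version B (the rewrite author's own statement) =====
-- stated objective: alternative
-- what changed: A walks the list with an index stepping by 1 or 2 merging neighbour pairs in place; B first run-length-encodes the list, then emits each run's merged pairs by arithmetic (c//2 doubled values, a leftover if c is odd) and pads with zeros.
import Mathlib
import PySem

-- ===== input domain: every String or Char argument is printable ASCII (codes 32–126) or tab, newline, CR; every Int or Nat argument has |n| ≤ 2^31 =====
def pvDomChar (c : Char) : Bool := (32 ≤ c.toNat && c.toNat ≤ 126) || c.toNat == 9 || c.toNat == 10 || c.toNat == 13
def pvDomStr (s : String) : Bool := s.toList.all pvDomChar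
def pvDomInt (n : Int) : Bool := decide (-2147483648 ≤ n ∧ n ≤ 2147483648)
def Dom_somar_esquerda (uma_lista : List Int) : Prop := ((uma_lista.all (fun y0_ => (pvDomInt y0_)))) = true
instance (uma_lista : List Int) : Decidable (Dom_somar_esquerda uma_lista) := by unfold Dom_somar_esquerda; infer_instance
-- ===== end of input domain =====

-- B re-decomposes A's index-stepping merge loop as run-length encoding plus per-run arithmetic (objective: alternative); return values proved equal on all inputs.

-- ===== PORT A =====
-- the while loop of A: k steps by 1 or 2 while (k:Int) < len-1, appending merges to nova
def seLoopA (l : List Int) (nova : List Int) (pontos : Int) (k : Nat) : List Int × Int :=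
  if h : (k : Int) < (l.length : Int) - 1 then
    let a := l.getD k 0       -- in range: k < len-1
    let b := l.getD (k+1) 0
    if a = b then seLoopA l (nova ++ [a + b]) (pontos + a + b) (k + 2)
    else seLoopA l (nova ++ [a]) pontos (k + 1)
  else
    -- if k == len(uma_lista) - 1: append last element
    let nova := if (k : Int) = (l.length : Int) - 1 then nova ++ [l.getD k 0] else nova
    -- while len(nova) != len(uma_lista): append 0
    (nova ++ List.replicate (l.length - nova.length) 0, pontos)
termination_by l.length - k
decreasing_by all_goals omega

def somar_esquerda (uma_lista : List Int) : List Int × Int :=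
  seLoopA uma_lista [] 0 0

-- ===== PORT B =====
-- run-length encoding kept reversed (Python mutates runs[-1]; here the head plays that role)
-- one step of the run-length encoding: bump the current (= head) run or open a new one
def runStep (rs : List (Int × Nat)) (x : Int) : List (Int × Nat) :=
  match rs with
  | (v, c) :: t => if v = x then (v, c + 1) :: t else (x, 1) :: (v, c) :: t
  | [] => [(x, 1)]

def seRunsRev (l : List Int) : List (Int × Nat) :=
  l.foldl runStep []

def somar_esquerda_alt (uma_lista : List Int) : List Int × Int :=
  let runs := (seRunsRev uma_lista).reverse
  let np := runs.foldl (fun (acc : List Int × Int) (vc : Int × Nat) =>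
    let v := vc.1
    let c := vc.2
    let nova := acc.1 ++ List.replicate (c / 2) (v + v)
    let pontos := acc.2 + (v + v) * ((c / 2 : Nat) : Int)
    (if c % 2 = 1 then nova ++ [v] else nova, pontos)) ([], 0)
  (np.1 ++ List.replicate (uma_lista.length - np.1.length) 0, np.2)

-- ===== PRECONDITION & SPEC =====
def Spec_somar_esquerda (uma_lista : List Int) (out : List Int × Int) : Prop := out = somar_esquerda_alt uma_lista
instance (uma_lista : List Int) (out : List Int × Int) : Decidable (Spec_somar_esquerda uma_lista out) := by unfold Spec_somar_esquerda; infer_instance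

-- ===== CLAIM (what is proved, stated in full; the proofs are below) =====
def Claim_equal_somar_esquerda : Prop := ∀ (uma_lista : List Int), Dom_somar_esquerda uma_lista → Spec_somar_esquerda uma_lista (somar_esquerda uma_lista)

-- ===== LEMMAS AND PROOFS =====

-- canonical greedy pair-merge both programs compute
def mergeCore : List Int → List Int × Int
  | a :: b :: t =>
    if a = b then
      let r := mergeCore t
      ((a + b) :: r.1, (a + b) + r.2)
    else
      let r := mergeCore (b :: t)
      (a :: r.1, r.2)
  | [a] => ([a], 0)
  | [] => ([], 0)

theorem seLoopA_spec (l : List Int) (k : Nat) (nova : List Int) (p : Int)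
    (hk : k ≤ l.length) :
    seLoopA l nova p k =
      ((nova ++ (mergeCore (l.drop k)).1)
          ++ List.replicate (l.length - (nova ++ (mergeCore (l.drop k)).1).length) 0,
        p + (mergeCore (l.drop k)).2) := by
  fun_induction seLoopA l nova p k with
  | case1 nova p k h a b hab ih =>
    have hk1 : k < l.length := by omega
    have hk2 : k + 1 < l.length := by omega
    have hd : l.drop k = l[k] :: l[k+1] :: l.drop (k + 2) := by
      rw [List.drop_eq_getElem_cons hk1, List.drop_eq_getElem_cons hk2]
    have ha : a = l[k] := List.getD_eq_getElem l 0 hk1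
    have hb : b = l[k+1] := List.getD_eq_getElem l 0 hk2
    rw [ih (by omega), hd]
    simp only [mergeCore, ← ha, ← hb, if_pos hab]
    simp
    omega
  | case2 nova p k h a b hab ih =>
    have hk1 : k < l.length := by omega
    have hk2 : k + 1 < l.length := by omega
    have hd : l.drop k = l[k] :: l[k+1] :: l.drop (k + 2) := by
      rw [List.drop_eq_getElem_cons hk1, List.drop_eq_getElem_cons hk2]
    have hd2 : l.drop (k + 1) = l[k+1] :: l.drop (k + 2) :=
      List.drop_eq_getElem_cons hk2
    have ha : a = l[k] := List.getD_eq_getElem l 0 hk1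
    have hb : b = l[k+1] := List.getD_eq_getElem l 0 hk2
    rw [ih (by omega), hd2, hd]
    simp only [mergeCore, ← ha, ← hb, if_neg hab]
    simp
  | case3 nova p k h novaF =>
    by_cases hl : (k : Int) = (l.length : Int) - 1
    · have hk1 : k < l.length := by omega
      have hd : l.drop k = [l[k]] := by
        rw [List.drop_eq_getElem_cons hk1, List.drop_eq_nil_of_le (by omega)]
      have ha : l.getD k 0 = l[k] := List.getD_eq_getElem l 0 hk1
      simp only [novaF, hd, mergeCore, ha]
      split_ifs
      simp
    · have hd : l.drop k = ([] : List Int) := List.drop_eq_nil_of_le (by omega)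
      simp only [novaF, hd, mergeCore]
      split_ifs
      simp

def emitRun (vc : Int × Nat) : List Int :=
  List.replicate (vc.2 / 2) (vc.1 + vc.1) ++ (if vc.2 % 2 = 1 then [vc.1] else [])

def flatRuns (rs : List (Int × Nat)) : List Int :=
  rs.flatMap (fun vc => List.replicate vc.2 vc.1)

def GoodRuns : List (Int × Nat) → Prop
  | [] => True
  | [vc] => 1 ≤ vc.2
  | a :: b :: t => 1 ≤ a.2 ∧ a.1 ≠ b.1 ∧ GoodRuns (b :: t)

theorem mergeCore_run (v : Int) (c : Nat) (rest : List Int)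
    (hr : rest.head? ≠ some v) :
    mergeCore (List.replicate c v ++ rest) =
      (emitRun (v, c) ++ (mergeCore rest).1,
       (v + v) * ((c / 2 : Nat) : Int) + (mergeCore rest).2) := by
  induction c using Nat.strong_induction_on with
  | _ c ih =>
    match c with
    | 0 => simp [emitRun]
    | 1 =>
      cases rest with
      | nil => simp [emitRun, mergeCore]
      | cons b t =>
        have hb : v ≠ b := fun hvb => hr (by simp [hvb])
        simp [emitRun, mergeCore, if_neg hb]
    | c + 2 =>
      have hrep : List.replicate (c + 2) v ++ rest
          = v :: v :: (List.replicate c v ++ rest) := by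
        simp [List.replicate_succ]
      rw [hrep]
      simp only [mergeCore]
      rw [ih c (by omega)]
      have h2 : (c + 2) / 2 = c / 2 + 1 := by omega
      have h3 : (c + 2) % 2 = c % 2 := by omega
      simp only [emitRun, h2, h3, List.replicate_succ, if_true]
      refine Prod.ext ?_ ?_
      · simp
      · push_cast
        ring

theorem mergeCore_flat (rs : List (Int × Nat)) (h : GoodRuns rs) :
    mergeCore (flatRuns rs) =
      (rs.flatMap emitRun,
       (rs.map (fun vc => (vc.1 + vc.1) * ((vc.2 / 2 : Nat) : Int))).sum) := by
  induction rs with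
  | nil => simp [flatRuns, mergeCore]
  | cons a t ih =>
    have htail : GoodRuns t := by
      cases t with
      | nil => trivial
      | cons b t' => exact h.2.2
    have hhead : (flatRuns t).head? ≠ some a.1 := by
      cases t with
      | nil => simp [flatRuns]
      | cons b t' =>
        have hb1 : 1 ≤ b.2 := by
          cases t' with
          | nil => exact htail
          | cons c t'' => exact htail.1
        have hne : a.1 ≠ b.1 := h.2.1
        obtain ⟨m, hm⟩ : ∃ m, b.2 = m + 1 := ⟨b.2 - 1, by omega⟩
        simp [flatRuns, hm, List.replicate_succ]
        exact fun hEq => hne hEq.symm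
    have hstep : flatRuns (a :: t) = List.replicate a.2 a.1 ++ flatRuns t := by
      simp [flatRuns]
    rw [hstep, mergeCore_run a.1 a.2 _ hhead, ih htail]
    refine Prod.ext ?_ ?_
    · simp
    · simp

theorem goodRuns_iff (rs : List (Int × Nat)) :
    GoodRuns rs ↔ (∀ vc ∈ rs, 1 ≤ vc.2) ∧ List.IsChain (fun (a b : Int × Nat) => a.1 ≠ b.1) rs := by
  induction rs with
  | nil => simp [GoodRuns]
  | cons a t ih =>
    cases t with
    | nil => simp [GoodRuns]
    | cons b t' =>
      simp only [GoodRuns, ih, List.isChain_cons_cons, List.mem_cons]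
      constructor
      · rintro ⟨h1, h2, h3, h4⟩
        exact ⟨by rintro vc (rfl | h) <;> [exact h1; exact h3 vc h], h2, h4⟩
      · rintro ⟨h1, h2, h3⟩
        exact ⟨h1 a (Or.inl rfl), h2, fun vc hvc => h1 vc (Or.inr hvc), h3⟩

theorem seRunsRev_inv (l : List Int) :
    ∀ rs : List (Int × Nat), (∀ vc ∈ rs, 1 ≤ vc.2) →
      List.IsChain (fun (a b : Int × Nat) => a.1 ≠ b.1) rs →
      flatRuns (List.foldl runStep rs l).reverse = flatRuns rs.reverse ++ l
        ∧ (∀ vc ∈ List.foldl runStep rs l, 1 ≤ vc.2)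
        ∧ List.IsChain (fun (a b : Int × Nat) => a.1 ≠ b.1) (List.foldl runStep rs l) := by
  induction l with
  | nil => intro rs h1 h2; exact ⟨by simp, h1, h2⟩
  | cons x l ih =>
    intro rs h1 h2
    rw [List.foldl_cons]
    match rs, h1, h2 with
    | [], _, _ =>
      have key := ih [(x, 1)] (by simp) (by simp)
      rw [show runStep [] x = [(x, 1)] from rfl]
      refine ⟨?_, key.2.1, key.2.2⟩
      rw [key.1]
      simp [flatRuns]
    | (v, c) :: t, h1, h2 =>
      by_cases hv : v = x
      · have h1' : ∀ vc ∈ (v, c + 1) :: t, 1 ≤ vc.2 := by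
          intro vc hvc
          rcases List.mem_cons.mp hvc with rfl | h
          · simp
          · exact h1 vc (List.mem_cons_of_mem _ h)
        have h2' : List.IsChain (fun (a b : Int × Nat) => a.1 ≠ b.1) ((v, c + 1) :: t) := by
          cases t with
          | nil => exact List.isChain_singleton _
          | cons b tb => exact List.isChain_cons_cons.mpr (List.isChain_cons_cons.mp h2)
        have key := ih ((v, c + 1) :: t) h1' h2'
        rw [show runStep ((v, c) :: t) x = (v, c + 1) :: t by simp [runStep, hv]]
        refine ⟨?_, key.2.1, key.2.2⟩
        rw [key.1]
        simp [flatRuns, List.replicate_succ', hv]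
      · have h1' : ∀ vc ∈ (x, 1) :: (v, c) :: t, 1 ≤ vc.2 := by
          intro vc hvc
          rcases List.mem_cons.mp hvc with rfl | h
          · simp
          · exact h1 vc h
        have h2' : List.IsChain (fun (a b : Int × Nat) => a.1 ≠ b.1) ((x, 1) :: (v, c) :: t) := by
          exact List.isChain_cons_cons.mpr ⟨fun hEq => hv hEq.symm, h2⟩
        have key := ih ((x, 1) :: (v, c) :: t) h1' h2'
        rw [show runStep ((v, c) :: t) x = (x, 1) :: (v, c) :: t by simp [runStep, hv]]
        refine ⟨?_, key.2.1, key.2.2⟩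
        rw [key.1]
        simp [flatRuns]

theorem seRunsRev_spec (l : List Int) :
    flatRuns (seRunsRev l).reverse = l ∧ GoodRuns (seRunsRev l).reverse := by
  have key := seRunsRev_inv l [] (by simp) (by simp)
  refine ⟨by simpa [seRunsRev, flatRuns] using key.1, ?_⟩
  rw [goodRuns_iff]
  refine ⟨fun vc hvc => key.2.1 vc (List.mem_reverse.mp hvc), ?_⟩
  rw [List.isChain_reverse]
  exact List.IsChain.imp (fun a b hab => fun hEq => hab hEq.symm) key.2.2

theorem alt_fold (runs : List (Int × Nat)) :
    ∀ acc : List Int × Int,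
      runs.foldl (fun (acc : List Int × Int) (vc : Int × Nat) =>
        let v := vc.1
        let c := vc.2
        let nova := acc.1 ++ List.replicate (c / 2) (v + v)
        let pontos := acc.2 + (v + v) * ((c / 2 : Nat) : Int)
        (if c % 2 = 1 then nova ++ [v] else nova, pontos)) acc
      = (acc.1 ++ runs.flatMap emitRun,
         acc.2 + (runs.map (fun vc => (vc.1 + vc.1) * ((vc.2 / 2 : Nat) : Int))).sum) := by
  induction runs with
  | nil => simp
  | cons a t ih =>
    intro acc
    rw [List.foldl_cons, ih]
    refine Prod.ext ?_ ?_
    · by_cases h : a.2 % 2 = 1 <;> simp [h, emitRun]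
    · simp
      ring

-- ===== VERDICT (by name: the statement is the Claim_ definition above) =====
theorem somar_esquerda_spec : Claim_equal_somar_esquerda := by
  intro l _
  unfold Spec_somar_esquerda somar_esquerda somar_esquerda_alt
  obtain ⟨hflat, hgood⟩ := seRunsRev_spec l
  have hm := mergeCore_flat _ hgood
  rw [hflat] at hm
  rw [seLoopA_spec l 0 [] 0 (by omega)]
  simp only [alt_fold]
  simp [hm]
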